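-- pv_equiv track=rewrite | github.com/goldenRabbit-23/AdventOfCode_2024 | day14/p2.py | maybe_christmas_tree
-- ===== SOURCE A (Python) =====
-- def maybe_christmas_tree(robots) -> bool:
--   total = len(robots)
--   count = 0
--
--   for x, y in robots:
--     count += any((x + dx, y + dy) in robots
--                   for dx, dy
--                   in [(-1, 0), (0, -1), (1, 0), (0, 1)])
--
--   return count >= total // 2
-- ===== SOURCE B (Python) =====
-- def maybe_christmas_tree(robots) -> bool:
--     robots = list(robots)
--     marked = set()
--     # column order: (x, y) lexicographic; vertically adjacent positions are consecutive
--     by_col = sorted(set(robots))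
--     for a, b in zip(by_col, by_col[1:]):
--         if b[0] == a[0] and b[1] == a[1] + 1:
--             marked.add(a)
--             marked.add(b)
--     # row order: (y, x) lexicographic; horizontally adjacent positions are consecutive
--     by_row = sorted(set(robots), key=lambda p: (p[1], p[0]))
--     for a, b in zip(by_row, by_row[1:]):
--         if b[1] == a[1] and b[0] == a[0] + 1:
--             marked.add(a)
--             marked.add(b)
--     count = sum(1 for r in robots if r in marked)
--     return count >= len(robots) // 2
-- ===== Notes on version B (the rewrite author's own statement) =====
-- stated objective: faster
-- what changed: Replaces A's per-robot linear scan of the robots list over four offsets by a sort-then-scan algorithm: sort the distinct positions twice (lexicographically by (x,y) and by (y,x)), mark both endpoints of every consecutive adjacent pair in each order, then count marked robots in one pass; no per-robot membership queries remain.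
import Mathlib
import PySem

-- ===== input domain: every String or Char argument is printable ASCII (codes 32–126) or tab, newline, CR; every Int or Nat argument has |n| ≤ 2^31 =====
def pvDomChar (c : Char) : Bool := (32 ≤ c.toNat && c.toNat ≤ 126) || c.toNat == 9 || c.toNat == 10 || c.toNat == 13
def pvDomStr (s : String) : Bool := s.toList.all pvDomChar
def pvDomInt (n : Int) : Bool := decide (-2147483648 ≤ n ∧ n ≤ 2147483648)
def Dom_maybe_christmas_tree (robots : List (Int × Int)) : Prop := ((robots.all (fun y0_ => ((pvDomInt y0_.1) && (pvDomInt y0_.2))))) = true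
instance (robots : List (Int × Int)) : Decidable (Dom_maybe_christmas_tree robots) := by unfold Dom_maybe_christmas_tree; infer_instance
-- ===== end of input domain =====

-- B replaces A's per-robot linear scan of the robots list by two lexicographic sorts of the
-- distinct positions with adjacent-pair marking passes (objective: faster).


-- ===== PORT A =====
def maybe_christmas_tree (robots : List (Int × Int)) : Bool :=
  let total : Int := robots.length
  let count : Int := robots.foldl (fun c p =>
    c + (if ([((-1 : Int), (0 : Int)), (0, -1), (1, 0), (0, 1)]).any
              (fun d => robots.contains (p.1 + d.1, p.2 + d.2)) then 1 else 0)) 0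
  decide (count ≥ PySem.Int.floordiv total 2)

-- ===== PORT B =====
def maybe_christmas_tree_alt (robots : List (Int × Int)) : Bool :=
  let marked0 : PySem.Set (Int × Int) := PySem.Set.empty
  -- sorted(set(robots)): tuples compare lexicographically -> sorted2 with keys fst, snd
  let byCol := PySem.List.sorted2 (PySem.Set.ofList robots) (fun p => p.1) (fun p => p.2)
  -- zip(by_col, by_col[1:]): the slice [1:] is drop 1
  let marked1 := (byCol.zip (byCol.drop 1)).foldl
      (fun m ab => if ab.2.1 == ab.1.1 && ab.2.2 == ab.1.2 + 1
                   then PySem.Set.add (PySem.Set.add m ab.1) ab.2 else m) marked0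
  let byRow := PySem.List.sorted2 (PySem.Set.ofList robots) (fun p => p.2) (fun p => p.1)
  let marked := (byRow.zip (byRow.drop 1)).foldl
      (fun m ab => if ab.2.2 == ab.1.2 && ab.2.1 == ab.1.1 + 1
                   then PySem.Set.add (PySem.Set.add m ab.1) ab.2 else m) marked1
  let count : Int := robots.foldl (fun c r => if PySem.Set.contains marked r then c + 1 else c) 0
  decide (count ≥ PySem.Int.floordiv (robots.length : Int) 2)

-- ===== PRECONDITION & SPEC =====
def Spec_maybe_christmas_tree (robots : List (Int × Int)) (out : Bool) : Prop := out = maybe_christmas_tree_alt robots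
instance (robots : List (Int × Int)) (out : Bool) : Decidable (Spec_maybe_christmas_tree robots out) := by unfold Spec_maybe_christmas_tree; infer_instance

-- ===== CLAIM (what is proved, stated in full; the proofs are below) =====
def Claim_equal_maybe_christmas_tree : Prop := ∀ (robots : List (Int × Int)), Dom_maybe_christmas_tree robots → Spec_maybe_christmas_tree robots (maybe_christmas_tree robots)

-- ===== LEMMAS AND PROOFS =====
def pvLexLe (f g : (Int × Int) → Int) (a b : Int × Int) : Prop :=
  f a < f b ∨ (f a = f b ∧ g a ≤ g b)

theorem insertBy_lex_pairwise (f g : (Int × Int) → Int) (x : Int × Int) (ys : List (Int × Int))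
    (h : ys.Pairwise (pvLexLe f g)) :
    (PySem.List.insertBy
      (fun a b => decide (f a < f b) || (!decide (f b < f a) && decide (g a < g b))) x ys).Pairwise
      (pvLexLe f g) := by
  induction ys with
  | nil => simp [PySem.List.insertBy]
  | cons y ys ih =>
    rw [PySem.List.insertBy.eq_2]
    rcases List.pairwise_cons.mp h with ⟨hy, hys⟩
    split
    · rename_i hb
      simp only [Bool.or_eq_true, Bool.and_eq_true, Bool.not_eq_eq_eq_not, Bool.not_true,
        decide_eq_true_eq, decide_eq_false_iff_not] at hb
      have hxy : pvLexLe f g x y := by unfold pvLexLe; omega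
      refine List.pairwise_cons.mpr ⟨?_, h⟩
      intro z hz
      rcases List.mem_cons.mp hz with rfl | hz'
      · exact hxy
      · have := hy z hz'
        unfold pvLexLe at *; omega
    · rename_i hb
      simp only [Bool.or_eq_true, Bool.and_eq_true, Bool.not_eq_eq_eq_not, Bool.not_true,
        decide_eq_true_eq, decide_eq_false_iff_not] at hb
      push Not at hb
      refine List.pairwise_cons.mpr ⟨?_, ih hys⟩
      intro z hz
      rcases (PySem.List.mem_insertBy _ _ _ _).mp hz with rfl | hz
      · unfold pvLexLe; omega
      · exact hy z hz

theorem foldl_insertBy_lex_pairwise (f g : (Int × Int) → Int) (xs acc : List (Int × Int))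
    (h : acc.Pairwise (pvLexLe f g)) :
    (xs.foldl (fun acc x => PySem.List.insertBy
      (fun a b => decide (f a < f b) || (!decide (f b < f a) && decide (g a < g b))) x acc)
      acc).Pairwise (pvLexLe f g) := by
  induction xs generalizing acc with
  | nil => exact h
  | cons x xs ih => exact ih _ (insertBy_lex_pairwise f g x acc h)

theorem sorted2_lex_pairwise (xs : List (Int × Int)) (f g : (Int × Int) → Int) :
    (PySem.List.sorted2 xs f g).Pairwise (pvLexLe f g) := by
  exact foldl_insertBy_lex_pairwise f g xs [] (List.Pairwise.nil)

theorem mem_markFold (ps : List ((Int × Int) × (Int × Int))) (init : PySem.Set (Int × Int))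
    (c : (Int × Int) × (Int × Int) → Bool) (x : Int × Int) :
    (x ∈ ps.foldl (fun m ab => if c ab then PySem.Set.add (PySem.Set.add m ab.1) ab.2 else m) init)
      ↔ x ∈ init ∨ ∃ ab ∈ ps, c ab = true ∧ (x = ab.1 ∨ x = ab.2) := by
  induction ps generalizing init with
  | nil => simp
  | cons p ps ih =>
    simp only [List.foldl, ih, List.mem_cons]
    rcases hc : c p with _ | _
    · constructor
      · rintro (h | h)
        · exact Or.inl h
        · exact Or.inr ⟨h.choose, Or.inr h.choose_spec.1, h.choose_spec.2⟩
      · rintro (h | ⟨ab, hab, hcab, hx⟩)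
        · exact Or.inl h
        · rcases hab with rfl | hab
          · simp [hc] at hcab
          · exact Or.inr ⟨ab, hab, hcab, hx⟩
    · simp only [if_true, PySem.Set.mem_add]
      constructor
      · rintro (((h | h) | h) | h)
        · exact Or.inl h
        · exact Or.inr ⟨p, Or.inl rfl, hc, Or.inl h⟩
        · exact Or.inr ⟨p, Or.inl rfl, hc, Or.inr h⟩
        · exact Or.inr ⟨h.choose, Or.inr h.choose_spec.1, h.choose_spec.2⟩
      · rintro (h | ⟨ab, hab, hcab, hx⟩)
        · exact Or.inl (Or.inl (Or.inl h))
        · rcases hab with rfl | hab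
          · rcases hx with rfl | rfl
            · exact Or.inl (Or.inl (Or.inr rfl))
            · exact Or.inl (Or.inr rfl)
          · exact Or.inr ⟨ab, hab, hcab, hx⟩

theorem mem_zip_tail (L : List (Int × Int)) (ab : (Int × Int) × (Int × Int)) :
    ab ∈ L.zip (L.drop 1) ↔ ∃ i, ∃ h : i + 1 < L.length, ab = (L[i], L[i + 1]) := by
  rw [List.mem_iff_getElem]
  constructor
  · rintro ⟨i, hi, rfl⟩
    rw [List.length_zip, List.length_drop] at hi
    refine ⟨i, by omega, ?_⟩
    rw [List.getElem_zip, List.getElem_drop]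
    simp only [Nat.add_comm 1 i]
  · rintro ⟨i, hi, rfl⟩
    refine ⟨i, ?_, ?_⟩
    · rw [List.length_zip, List.length_drop]; omega
    · rw [List.getElem_zip, List.getElem_drop]
      simp only [Nat.add_comm 1 i]

def pvLexLt (f g : (Int × Int) → Int) (a b : Int × Int) : Prop :=
  f a < f b ∨ (f a = f b ∧ g a < g b)

theorem sorted2_lex_pairwise_lt (xs : List (Int × Int)) (f g : (Int × Int) → Int)
    (hinj : ∀ a b : Int × Int, f a = f b → g a = g b → a = b)
    (hnd : xs.Nodup) :
    (PySem.List.sorted2 xs f g).Pairwise (pvLexLt f g) := by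
  have hnd' : (PySem.List.sorted2 xs f g).Nodup :=
    (PySem.List.sorted2_perm xs f g false).symm.nodup hnd
  have := (sorted2_lex_pairwise xs f g).and hnd'
  refine this.imp ?_
  rintro a b ⟨hle, hne⟩
  unfold pvLexLe at hle
  unfold pvLexLt
  rcases hle with h | ⟨h1, h2⟩
  · exact Or.inl h
  · refine Or.inr ⟨h1, ?_⟩
    rcases lt_or_eq_of_le h2 with h | h
    · exact h
    · exact absurd (hinj a b h1 h) hne

theorem adjacent_of_mem (f g : (Int × Int) → Int) (L : List (Int × Int))
    (hp : L.Pairwise (pvLexLt f g)) (u v : Int × Int) (hu : u ∈ L) (hv : v ∈ L)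
    (hf : f v = f u) (hg : g v = g u + 1) :
    ∃ i, ∃ h : i + 1 < L.length, L[i] = u ∧ L[i + 1] = v := by
  have hp' := List.pairwise_iff_getElem.mp hp
  rcases List.mem_iff_getElem.mp hu with ⟨i, hi, hLi⟩
  rcases List.mem_iff_getElem.mp hv with ⟨j, hj, hLj⟩
  have hij : i < j := by
    by_contra hc
    rcases Nat.lt_or_ge j i with h | h
    · have := hp' j i hj hi h
      rw [hLi, hLj] at this
      unfold pvLexLt at this; omega
    · have : i = j := by omega
      subst this
      rw [hLi] at hLj
      subst hLj
      omega
  have hj1 : j = i + 1 := by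
    by_contra hc
    have h1 : i + 1 < j := by omega
    have ha := hp' i (i+1) hi (by omega) (by omega)
    have hb := hp' (i+1) j (by omega) hj h1
    rw [hLi] at ha
    rw [hLj] at hb
    unfold pvLexLt at ha hb; omega
  subst hj1
  exact ⟨i, hj, hLi, hLj⟩

theorem marks_iff (R : List (Int × Int)) (f g : (Int × Int) → Int)
    (hinj : ∀ a b : Int × Int, f a = f b → g a = g b → a = b) (x : Int × Int) :
    (∃ ab ∈ (PySem.List.sorted2 (PySem.Set.ofList R) f g).zip
        ((PySem.List.sorted2 (PySem.Set.ofList R) f g).drop 1),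
      ((f ab.2 == f ab.1) && (g ab.2 == g ab.1 + 1)) = true ∧ (x = ab.1 ∨ x = ab.2))
    ↔ (x ∈ R ∧ ((∃ y ∈ R, f y = f x ∧ g y = g x + 1) ∨ (∃ y ∈ R, f y = f x ∧ g y = g x - 1))) := by
  have hmem : ∀ z : Int × Int, z ∈ PySem.List.sorted2 (PySem.Set.ofList R) f g ↔ z ∈ R := by
    intro z
    exact ((PySem.List.sorted2_perm (PySem.Set.ofList R) f g false).mem_iff).trans
      (PySem.Set.mem_ofList R z)
  constructor
  · rintro ⟨ab, habz, hcond, hx⟩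
    rcases (mem_zip_tail _ ab).mp habz with ⟨i, hlen, rfl⟩
    simp only [Bool.and_eq_true, beq_iff_eq] at hcond
    have hu : (PySem.List.sorted2 (PySem.Set.ofList R) f g)[i] ∈ R :=
      (hmem _).mp (List.getElem_mem _)
    have hv : (PySem.List.sorted2 (PySem.Set.ofList R) f g)[i+1] ∈ R :=
      (hmem _).mp (List.getElem_mem _)
    rcases hx with rfl | rfl
    · exact ⟨hu, Or.inl ⟨_, hv, hcond.1, hcond.2⟩⟩
    · refine ⟨hv, Or.inr ⟨_, hu, hcond.1.symm, ?_⟩⟩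
      rw [hcond.2]; ring
  · rintro ⟨hxR, hy | hy⟩ <;> rcases hy with ⟨y, hyR, hf, hg⟩
    · rcases adjacent_of_mem f g _ (sorted2_lex_pairwise_lt _ f g hinj (PySem.Set.nodup_ofList R))
        x y ((hmem x).mpr hxR) ((hmem y).mpr hyR) hf hg with ⟨i, h, hLi, hLj⟩
      refine ⟨_, (mem_zip_tail _ _).mpr ⟨i, h, rfl⟩, ?_, Or.inl hLi.symm⟩
      simp only [Bool.and_eq_true, beq_iff_eq, hLi, hLj]
      exact ⟨hf, hg⟩
    · rcases adjacent_of_mem f g _ (sorted2_lex_pairwise_lt _ f g hinj (PySem.Set.nodup_ofList R))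
        y x ((hmem y).mpr hyR) ((hmem x).mpr hxR) (by omega) (by omega) with ⟨i, h, hLi, hLj⟩
      refine ⟨_, (mem_zip_tail _ _).mpr ⟨i, h, rfl⟩, ?_, Or.inr hLj.symm⟩
      simp only [Bool.and_eq_true, beq_iff_eq, hLi, hLj]
      constructor <;> omega

theorem pair_mem_fst (R : List (Int × Int)) (a b : Int) :
    (∃ y ∈ R, y.1 = a ∧ y.2 = b) ↔ (a, b) ∈ R := by
  constructor
  · rintro ⟨⟨y1, y2⟩, hy, rfl, rfl⟩; exact hy
  · intro h; exact ⟨(a, b), h, rfl, rfl⟩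

theorem pair_mem_snd (R : List (Int × Int)) (a b : Int) :
    (∃ y ∈ R, y.2 = b ∧ y.1 = a) ↔ (a, b) ∈ R := by
  constructor
  · rintro ⟨⟨y1, y2⟩, hy, rfl, rfl⟩; exact hy
  · intro h; exact ⟨(a, b), h, rfl, rfl⟩

-- ===== VERDICT (by name: the statement is the Claim_ definition above) =====
theorem maybe_christmas_tree_spec : Claim_equal_maybe_christmas_tree := by
  intro robots _
  unfold Spec_maybe_christmas_tree maybe_christmas_tree maybe_christmas_tree_alt
  simp only []
  rw [PySem.List.foldl_add, PySem.List.sum_map_ite_one_zero, PySem.List.foldl_if_add_one]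
  rw [List.countP_congr (q := fun r => PySem.Set.contains _ r) ?_]
  intro x hx
  simp only [List.any_cons, List.any_nil, Bool.or_eq_true, decide_eq_true_eq,
    List.contains_eq_mem, PySem.Set.contains]
  rw [mem_markFold, mem_markFold]
  rw [marks_iff robots (fun p => p.1) (fun p => p.2) (fun a b h1 h2 => Prod.ext h1 h2) x,
    marks_iff robots (fun p => p.2) (fun p => p.1) (fun a b h1 h2 => Prod.ext h2 h1) x]
  simp only [pair_mem_fst, pair_mem_snd, PySem.Set.empty, List.not_mem_nil, false_or,
    add_zero, ← sub_eq_add_neg, hx, true_and, Bool.false_eq_true, or_false]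
  tauto
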